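-- pv_equiv track=rewrite | github.com/vietanhdev/edgevox | edgevox/integrations/chess/analytics.py | classify_move
-- ===== SOURCE A (Python) =====
-- from enum import Enum
--
-- class MoveClassification(str, Enum):
--     """How a move compares to the engine's best line before it was played.
--
--     Thresholds are in centipawns of eval swing against the mover. The
--     bands mirror what Lichess / chess.com show next to each move so the
--     voice commentary ("that was a blunder") stays consistent with what
--     users see on the board.
--     """
--
--     BEST = "best"
--     GOOD = "good"
--     INACCURACY = "inaccuracy"
--     MISTAKE = "mistake"
--     BLUNDER = "blunder"
--
-- _BAND_EDGES_CP: tuple[tuple[int, MoveClassification], ...] = (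
--     (10, MoveClassification.BEST),
--     (50, MoveClassification.GOOD),
--     (150, MoveClassification.INACCURACY),
--     (300, MoveClassification.MISTAKE),
-- )
--
-- def classify_move(cp_swing: int | None) -> MoveClassification:
--     """Bucket a centipawn eval swing into a human-readable label.
--
--     Args:
--         cp_swing: how many centipawns the mover lost by playing this
--             move instead of the engine's top choice. ``None`` (e.g. the
--             position went straight to mate) is treated as a blunder.
--     """
--     if cp_swing is None:
--         return MoveClassification.BLUNDER
--     magnitude = abs(int(cp_swing))
--     for edge, label in _BAND_EDGES_CP:
--         if magnitude <= edge:
--             return label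
--     return MoveClassification.BLUNDER
-- ===== SOURCE B (Python) =====
-- from enum import Enum
--
-- class MoveClassification(str, Enum):
--     BEST = "best"
--     GOOD = "good"
--     INACCURACY = "inaccuracy"
--     MISTAKE = "mistake"
--     BLUNDER = "blunder"
--
-- _THRESHOLDS = [10, 50, 150, 300]
-- _LABELS = [
--     MoveClassification.BEST,
--     MoveClassification.GOOD,
--     MoveClassification.INACCURACY,
--     MoveClassification.MISTAKE,
-- ]
--
-- def classify_move(cp_swing):
--     """Bucket a centipawn eval swing via binary search over the band edges."""
--     if cp_swing is None:
--         return MoveClassification.BLUNDER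
--     magnitude = abs(int(cp_swing))
--     # bisect_left by hand: first index with _THRESHOLDS[idx] >= magnitude
--     lo, hi = 0, len(_THRESHOLDS)
--     while lo < hi:
--         mid = (lo + hi) // 2
--         if _THRESHOLDS[mid] < magnitude:
--             lo = mid + 1
--         else:
--             hi = mid
--     return _LABELS[lo] if lo < len(_LABELS) else MoveClassification.BLUNDER
-- ===== Notes on version B (the rewrite author's own statement) =====
-- stated objective: alternative
-- what changed: replaces the linear scan over the (edge,label) table with a hand-rolled bisect_left binary search over a thresholds list, then indexes a parallel labels list
import Mathlib
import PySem

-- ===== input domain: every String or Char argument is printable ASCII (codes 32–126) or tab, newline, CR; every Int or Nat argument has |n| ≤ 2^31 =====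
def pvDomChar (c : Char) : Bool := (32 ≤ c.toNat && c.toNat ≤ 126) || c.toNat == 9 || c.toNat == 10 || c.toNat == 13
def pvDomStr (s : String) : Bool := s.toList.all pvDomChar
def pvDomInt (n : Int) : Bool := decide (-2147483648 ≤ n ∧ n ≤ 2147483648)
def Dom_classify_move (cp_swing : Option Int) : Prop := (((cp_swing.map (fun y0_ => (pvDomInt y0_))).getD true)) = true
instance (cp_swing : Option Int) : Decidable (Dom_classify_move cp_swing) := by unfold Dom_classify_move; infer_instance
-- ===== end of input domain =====

-- B replaces A's linear scan of the band table with a binary search over a thresholds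
-- list plus a parallel labels list (alternative structure; same values everywhere).
-- ===== PORT A =====
def pvBandEdges : List (Int × String) :=
  [(10, "best"), (50, "good"), (150, "inaccuracy"), (300, "mistake")]

def pvScanA (magnitude : Int) : List (Int × String) → String
  | [] => "blunder"
  | (edge, label) :: rest => if magnitude ≤ edge then label else pvScanA magnitude rest

def classify_move (cp_swing : Option Int) : String :=
  match cp_swing with
  | none => "blunder"
  | some cp => pvScanA |cp| pvBandEdges

-- ===== PORT B =====
def pvThresholds : List Int := [10, 50, 150, 300]
def pvLabels : List String := ["best", "good", "inaccuracy", "mistake"]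

-- hand-rolled bisect_left from Source B: first index with pvThresholds[idx] >= magnitude
def pvBisect (magnitude : Int) (lo hi : Nat) : Nat :=
  if _h : lo < hi then
    let mid := (lo + hi) / 2
    if pvThresholds.getD mid 0 < magnitude then pvBisect magnitude (mid + 1) hi
    else pvBisect magnitude lo mid
  else lo
termination_by hi - lo
decreasing_by all_goals omega

def classify_move_alt (cp_swing : Option Int) : String :=
  match cp_swing with
  | none => "blunder"
  | some cp =>
    let magnitude := |cp|
    let lo := pvBisect magnitude 0 pvThresholds.length
    if lo < pvLabels.length then pvLabels.getD lo "blunder" else "blunder"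

-- ===== PRECONDITION & SPEC =====
def Spec_classify_move (cp_swing : Option Int) (out : String) : Prop := out = classify_move_alt cp_swing
instance (cp_swing : Option Int) (out : String) : Decidable (Spec_classify_move cp_swing out) := by unfold Spec_classify_move; infer_instance

-- ===== CLAIM (what is proved, stated in full; the proofs are below) =====
def Claim_equal_classify_move : Prop := ∀ (cp_swing : Option Int), Dom_classify_move cp_swing → Spec_classify_move cp_swing (classify_move cp_swing)

-- ===== LEMMAS AND PROOFS =====

-- ===== VERDICT (by name: the statement is the Claim_ definition above) =====
theorem pvBisect_done (m : Int) (lo : Nat) : pvBisect m lo lo = lo := by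
  rw [pvBisect]; simp

theorem pvBisect_step (m : Int) (lo hi : Nat) (h : lo < hi) :
    pvBisect m lo hi =
      if pvThresholds.getD ((lo + hi) / 2) 0 < m then pvBisect m ((lo + hi) / 2 + 1) hi
      else pvBisect m lo ((lo + hi) / 2) := by
  rw [pvBisect]; simp [h]

theorem pvBisect_eval (m : Int) :
    pvBisect m 0 4 = if m ≤ 10 then 0 else if m ≤ 50 then 1 else if m ≤ 150 then 2
      else if m ≤ 300 then 3 else 4 := by
  have e01 : pvBisect m 0 1 = if 10 < m then 1 else 0 := by
    rw [pvBisect_step m 0 1 (by norm_num)]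
    norm_num [pvThresholds, pvBisect_done]
  have e02 : pvBisect m 0 2 = if 50 < m then 2 else pvBisect m 0 1 := by
    rw [pvBisect_step m 0 2 (by norm_num)]
    norm_num [pvThresholds, pvBisect_done]
  have e34 : pvBisect m 3 4 = if 300 < m then 4 else 3 := by
    rw [pvBisect_step m 3 4 (by norm_num)]
    norm_num [pvThresholds, pvBisect_done]
  rw [pvBisect_step m 0 4 (by norm_num)]
  norm_num [pvThresholds, e34, e02, e01]
  split_ifs <;> omega

theorem classify_move_spec : Claim_equal_classify_move := by
  intro cp hd
  unfold Spec_classify_move classify_move classify_move_alt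
  cases cp with
  | none => rfl
  | some c =>
    show pvScanA |c| pvBandEdges = _
    simp only [pvBandEdges, pvScanA, show pvThresholds.length = 4 from rfl,
      show pvLabels.length = 4 from rfl, pvBisect_eval]
    split_ifs <;> simp_all [pvLabels]
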